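-- pv_equiv track=rewrite | github.com/aarpyy/Cryptography | ps3.py | StringToNum
-- ===== SOURCE A (Python) =====
-- def StringToNum(s):
--     n = ''
--     for i in range(len(s) - 1, -1, -1):
--         n += s[i]
--
--     result = 0
--     for i in range(len(n)):
--         result += (128 ** i) * ord(n[i])
--     return result
-- ===== SOURCE B (Python) =====
-- def StringToNum(s):
--     result = 0
--     for c in s:
--         result = result * 128 + ord(c)
--     return result
-- ===== Notes on version B (the rewrite author's own statement) =====
-- stated objective: faster
-- what changed: Replaces the reverse-the-string pass plus a loop computing 128**i for every position with a single forward Horner pass result = result*128 + ord(c).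
import Mathlib
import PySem

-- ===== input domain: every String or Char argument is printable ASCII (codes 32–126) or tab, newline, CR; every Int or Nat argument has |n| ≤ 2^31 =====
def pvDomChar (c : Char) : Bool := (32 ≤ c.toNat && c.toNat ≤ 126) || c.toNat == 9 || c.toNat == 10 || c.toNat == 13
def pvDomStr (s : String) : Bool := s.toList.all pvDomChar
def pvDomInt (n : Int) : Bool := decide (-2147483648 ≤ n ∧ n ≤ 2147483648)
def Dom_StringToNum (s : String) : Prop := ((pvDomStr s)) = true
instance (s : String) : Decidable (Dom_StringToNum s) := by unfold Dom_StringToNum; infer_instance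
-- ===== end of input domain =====

-- B replaces A's reverse-then-sum-of-128**i passes with one forward Horner pass
-- (result = result*128 + ord(c)); objective: faster (O(L) big-int mults instead of O(L^2) digit work).

-- ===== PORT A =====
-- A: build n = s reversed by indexing from len-1 down to 0, then sum 128**i * ord(n[i]).
def StringToNum (s : String) : Int :=
  let n : List Char :=
    (PySem.List.pyRange ((s.toList.length : Int) - 1) (-1) (-1)).foldl
      (fun acc i => acc ++ [PySem.List.pyGetD s.toList i ' ']) []
  (PySem.List.pyRange 0 (n.length : Int) 1).foldl
    (fun r i => r + 128 ^ i.toNat * ((PySem.List.pyGetD n i ' ').toNat : Int)) 0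

-- ===== PORT B =====
-- B: single forward Horner pass.
def StringToNum_alt (s : String) : Int :=
  s.toList.foldl (fun r c => r * 128 + (c.toNat : Int)) 0

-- ===== PRECONDITION & SPEC =====
def Spec_StringToNum (s : String) (out : Int) : Prop := out = StringToNum_alt s
instance (s : String) (out : Int) : Decidable (Spec_StringToNum s out) := by unfold Spec_StringToNum; infer_instance

-- ===== CLAIM (what is proved, stated in full; the proofs are below) =====
def Claim_equal_StringToNum : Prop := ∀ (s : String), Dom_StringToNum s → Spec_StringToNum s (StringToNum s)

-- ===== LEMMAS AND PROOFS =====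

/-- Little-endian base-128 value of a character list. -/
def pvG : List Char → Int
  | [] => 0
  | c :: t => (c.toNat : Int) + 128 * pvG t

lemma pvG_append_singleton (l : List Char) (c : Char) :
    pvG (l ++ [c]) = pvG l + 128 ^ l.length * (c.toNat : Int) := by
  induction l with
  | nil => simp [pvG]
  | cons x t ih => simp [pvG, ih, pow_succ]; ring

/-- A's first loop produces the reversed character list. -/
lemma stringToNum_rev (xs : List Char) :
    (PySem.List.pyRange ((xs.length : Int) - 1) (-1) (-1)).foldl
      (fun acc i => acc ++ [PySem.List.pyGetD xs i ' ']) [] = xs.reverse := by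
  have hr : PySem.List.pyRange ((xs.length : Int) - 1) (-1) (-1)
      = (PySem.List.pyRange 0 (xs.length : Int) 1).reverse := by
    rw [PySem.List.pyRange_neg_one_eq_reverse]; norm_num
  rw [hr, PySem.List.foldl_append_singleton_eq_map]
  rw [List.map_reverse, PySem.List.map_pyGetD_pyRange_zero']
  simp

/-- Nat-indexed base-128 sum over a list equals pvG. -/
lemma pvG_sum (m : List Char) :
    ((List.range m.length).map (fun k => (128 : Int) ^ k * ((m.getD k ' ').toNat : Int))).sum
      = pvG m := by
  induction m with
  | nil => simp [pvG]
  | cons c t ih =>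
    rw [List.length_cons, List.range_succ_eq_map, List.map_cons, List.map_map, List.sum_cons]
    have hc : (fun k => (128 : Int) ^ k * (((c :: t).getD k ' ').toNat : Int)) ∘ Nat.succ
        = fun k => 128 * ((128 : Int) ^ k * ((t.getD k ' ').toNat : Int)) := by
      funext k
      simp [Function.comp, pow_succ]
      ring
    rw [hc, List.sum_map_mul_left, ih]
    simp [pvG]

/-- A's second loop computes the little-endian value pvG. -/
lemma stringToNum_sum (m : List Char) :
    (PySem.List.pyRange 0 (m.length : Int) 1).foldl
      (fun r i => r + 128 ^ i.toNat * ((PySem.List.pyGetD m i ' ').toNat : Int)) 0 = pvG m := by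
  rw [PySem.List.foldl_add, PySem.List.pyRange_zero_nat, List.map_map]
  have hc : (fun i : Int => (128 : Int) ^ i.toNat * ((PySem.List.pyGetD m i ' ').toNat : Int)) ∘
        (fun k : Nat => (k : Int))
      = fun k => (128 : Int) ^ k * ((m.getD k ' ').toNat : Int) := by
    funext k
    simp [Function.comp, PySem.List.pyGetD_natCast]
  rw [hc, pvG_sum]
  exact zero_add _

/-- Horner's rule: B's fold equals acc·128^|l| plus the little-endian value of the reverse. -/
lemma horner (l : List Char) (acc : Int) :
    l.foldl (fun r c => r * 128 + (c.toNat : Int)) acc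
      = acc * 128 ^ l.length + pvG l.reverse := by
  induction l generalizing acc with
  | nil => simp [pvG]
  | cons c t ih =>
    rw [List.foldl_cons, ih, List.reverse_cons, pvG_append_singleton]
    simp [pow_succ]
    ring

-- ===== VERDICT (by name: the statement is the Claim_ definition above) =====
theorem StringToNum_spec : Claim_equal_StringToNum := by
  intro s _
  show StringToNum s = StringToNum_alt s
  rw [StringToNum, StringToNum_alt, stringToNum_rev, stringToNum_sum, horner]
  simp
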